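-- pv_equiv track=rewrite | github.com/numerical-engine/piEnsight | piEnsight/utils.py | split_parts_description
-- ===== SOURCE A (Python) =====
-- def split_parts_description(lines:list[str])->list[list[str]]:
--     """Split the lines of a mesh file into parts.
--
--     Args:
--         lines (list[str]): The lines of the mesh file.
--     Returns:
--         list[list[str]]: A list of parts, each part is a list of lines.
--     """
--
--     assert lines[0].strip() == "part", "The first line must be 'part'"
--     parts_lines = []
--
--     current_idx = 0
--     while current_idx < len(lines):
--         part_lines = [lines[current_idx].strip()]
--         current_idx += 1
--         while current_idx < len(lines) and lines[current_idx].strip() != "part":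
--             part_lines.append(lines[current_idx].strip())
--             current_idx += 1
--         parts_lines.append(part_lines)
--
--     return parts_lines
-- ===== SOURCE B (Python) =====
-- def split_parts_description(lines: list[str]) -> list[list[str]]:
--     """Split the lines of a mesh file into parts (one reverse pass with
--     flush-on-delimiter instead of nested index loops)."""
--     assert lines[0].strip() == "part", "The first line must be 'part'"
--     parts = []
--     current = []
--     for line in reversed(lines):
--         s = line.strip()
--         current.append(s)
--         if s == "part":
--             current.reverse()
--             parts.append(current)
--             current = []
--     parts.reverse()
--     return parts
-- ===== Notes on version B (the rewrite author's own statement) =====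
-- stated objective: alternative
-- what changed: Replaces A's nested index-based while loops with a single reverse-order pass that accumulates the current chunk and flushes it whenever the stripped line equals 'part'.
import Mathlib
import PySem

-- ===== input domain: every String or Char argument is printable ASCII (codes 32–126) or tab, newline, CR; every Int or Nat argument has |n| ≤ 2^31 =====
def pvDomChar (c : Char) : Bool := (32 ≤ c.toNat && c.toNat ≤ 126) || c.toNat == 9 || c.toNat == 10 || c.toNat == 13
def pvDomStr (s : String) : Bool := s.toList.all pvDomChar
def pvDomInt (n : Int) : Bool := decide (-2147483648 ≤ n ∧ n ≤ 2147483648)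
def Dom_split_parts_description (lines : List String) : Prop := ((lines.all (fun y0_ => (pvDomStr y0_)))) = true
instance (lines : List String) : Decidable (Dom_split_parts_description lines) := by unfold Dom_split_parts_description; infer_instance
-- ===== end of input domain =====

-- B replaces A's nested index-based while loops by a single reverse pass that flushes the
-- current chunk on each 'part' delimiter (objective: alternative decomposition, same cost).

-- ===== PORT A =====
-- inner while loop of A: consume stripped lines from index i until a 'part' line or the end;
-- returns the collected stripped lines and the index the loop stops at
def pvInnerA (lines : List String) (i : Nat) : List String × Nat :=
  if h : i < lines.length ∧ PySem.Str.strip (lines.getD i "") ≠ "part" then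
    let r := pvInnerA lines (i + 1)
    (PySem.Str.strip (lines.getD i "") :: r.1, r.2)
  else ([], i)
termination_by lines.length - i
decreasing_by omega

-- the inner loop never moves the index backwards (needed for pvOuterA's termination)
theorem pvInnerA_ge (lines : List String) (i : Nat) : i ≤ (pvInnerA lines i).2 := by
  unfold pvInnerA
  split
  · next h =>
    have hr := pvInnerA_ge lines (i + 1)
    simpa using by omega
  · simp
termination_by lines.length - i
decreasing_by omega

-- outer while loop of A
def pvOuterA (lines : List String) (i : Nat) : List (List String) :=
  if h : i < lines.length then
    let r := pvInnerA lines (i + 1)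
    (PySem.Str.strip (lines.getD i "") :: r.1) :: pvOuterA lines r.2
  else []
termination_by lines.length - i
decreasing_by
  have := pvInnerA_ge lines (i + 1)
  omega

-- A's assert (and the IndexError on []) raises exactly outside Pre_; the value is the loops'
def split_parts_description (lines : List String) : List (List String) := pvOuterA lines 0

-- ===== PORT B =====
-- one step of B's loop body over reversed(lines): state = (parts, current)
def pvStepB (p : List (List String) × List String) (l : String) :
    List (List String) × List String :=
  let s := PySem.Str.strip l
  let cur := p.2 ++ [s]
  if s = "part" then (p.1 ++ [cur.reverse], []) else (p.1, cur)

def split_parts_description_alt (lines : List String) : List (List String) :=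
  ((lines.reverse.foldl pvStepB ([], [])).1).reverse

-- ===== PRECONDITION & SPEC =====
-- Pre_ excludes exactly the inputs where A raises: an empty input (IndexError on lines[0]) and
-- a first line that does not strip to "part" (AssertionError); B raises on the very same inputs.
def Pre_split_parts_description (lines : List String) : Prop :=
  lines ≠ [] ∧ PySem.Str.strip (lines.headD "") = "part"
instance (lines : List String) : Decidable (Pre_split_parts_description lines) := by
  unfold Pre_split_parts_description; infer_instance

def pvWitness_split_parts_description : List String := ["part", "a", " part ", "b"]

def Spec_split_parts_description (lines : List String) (out : List (List String)) : Prop :=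
  out = split_parts_description_alt lines
instance (lines : List String) (out : List (List String)) :
    Decidable (Spec_split_parts_description lines out) := by
  unfold Spec_split_parts_description; infer_instance

-- ===== CLAIM (what is proved, stated in full; the proofs are below) =====
def Claim_equal_split_parts_description : Prop :=
  ∀ (lines : List String), Dom_split_parts_description lines →
    Pre_split_parts_description lines →
      Spec_split_parts_description lines (split_parts_description lines)

-- ===== LEMMAS AND PROOFS =====

-- common reference form: chunk a stripped line list at each "part" delimiter
def pvChunk : List String → List (List String)
  | [] => []
  | s :: rest =>
    (s :: rest.takeWhile (fun t => t != "part")) :: pvChunk (rest.dropWhile (fun t => t != "part"))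
termination_by l => l.length
decreasing_by
  have := List.length_dropWhile_le (fun t => t != "part") rest
  simp at *; omega

-- B's step on an already-stripped line, with parts/current kept in order
def pvG (s : String) (p : List (List String) × List String) :
    List (List String) × List String :=
  if s = "part" then ((s :: p.2) :: p.1, []) else (p.1, s :: p.2)

theorem pvInnerA_spec (lines : List String) (i : Nat) :
    pvInnerA lines i =
      (((lines.drop i).takeWhile (fun l => PySem.Str.strip l != "part")).map PySem.Str.strip,
       i + ((lines.drop i).takeWhile (fun l => PySem.Str.strip l != "part")).length) := by
  by_cases hlt : i < lines.length
  · have hd : lines.drop i = lines[i] :: lines.drop (i + 1) := List.drop_eq_getElem_cons hlt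
    have hg : lines.getD i "" = lines[i] := List.getD_eq_getElem lines "" hlt
    by_cases hs : PySem.Str.strip lines[i] = "part"
    · rw [pvInnerA, dif_neg (fun hcon => hcon.2 (by rw [hg]; exact hs)), hd,
        List.takeWhile_cons]
      simp [hs]
    · rw [pvInnerA, dif_pos ⟨hlt, by rw [hg]; exact hs⟩]
      have ih := pvInnerA_spec lines (i + 1)
      rw [hd, List.takeWhile_cons]
      simp only [ih, hg, hs, bne_iff_ne, ne_eq, not_false_eq_true, if_true,
        List.map_cons, List.length_cons, Prod.mk.injEq]
      exact ⟨by trivial, by omega⟩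
  · rw [pvInnerA, dif_neg (fun h => absurd h.1 hlt), List.drop_eq_nil_of_le (by omega)]
    simp
termination_by lines.length - i
decreasing_by omega

theorem pvOuterA_spec (lines : List String) (i : Nat) :
    pvOuterA lines i = pvChunk ((lines.drop i).map PySem.Str.strip) := by
  by_cases hlt : i < lines.length
  · have hd : lines.drop i = lines[i] :: lines.drop (i + 1) := List.drop_eq_getElem_cons hlt
    have hg : lines.getD i "" = lines[i] := List.getD_eq_getElem lines "" hlt
    have htw := List.takeWhile_append_dropWhile
      (p := fun l => PySem.Str.strip l != "part") (l := lines.drop (i + 1))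
    have hlen : ((lines.drop (i + 1)).takeWhile (fun l => PySem.Str.strip l != "part")).length
        ≤ lines.length - (i + 1) := by
      have h1 := congrArg List.length htw
      simp only [List.length_append, List.length_drop] at h1
      omega
    have ih := pvOuterA_spec lines
      (i + 1 + ((lines.drop (i + 1)).takeWhile (fun l => PySem.Str.strip l != "part")).length)
    have hdrop : lines.drop
        (i + 1 + ((lines.drop (i + 1)).takeWhile (fun l => PySem.Str.strip l != "part")).length)
        = (lines.drop (i + 1)).dropWhile (fun l => PySem.Str.strip l != "part") := by
      rw [← List.drop_drop]
      nth_rewrite 2 [← htw]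
      exact List.drop_left
    rw [pvOuterA, dif_pos hlt, pvInnerA_spec]
    dsimp only
    rw [hg, hd, List.map_cons, pvChunk, List.takeWhile_map, List.dropWhile_map]
    simp only [Function.comp_def]
    rw [ih, hdrop]
  · rw [pvOuterA, dif_neg hlt, List.drop_eq_nil_of_le (by omega)]
    simp [pvChunk]
termination_by lines.length - i
decreasing_by omega

theorem pvFoldrG_snd (ss : List String) :
    (ss.foldr pvG ([], [])).2 = ss.takeWhile (fun t => t != "part") := by
  induction ss with
  | nil => simp
  | cons x t ih =>
    by_cases hx : x = "part" <;>
      simp [pvG, hx, ih]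

theorem pvFoldrG_fst (ss : List String) :
    (ss.foldr pvG ([], [])).1 = pvChunk (ss.dropWhile (fun t => t != "part")) := by
  induction ss with
  | nil => simp [pvChunk]
  | cons x t ih =>
    by_cases hx : x = "part"
    · simp [pvG, hx, pvFoldrG_snd, ih, pvChunk]
    · simp [pvG, hx, ih]

theorem pvAlt_foldr (lines : List String) :
    lines.foldr (fun l p => pvStepB p l) ([], []) =
      (((lines.map PySem.Str.strip).foldr pvG ([], [])).1.reverse,
       ((lines.map PySem.Str.strip).foldr pvG ([], [])).2.reverse) := by
  induction lines with
  | nil => simp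
  | cons x t ih =>
    simp only [List.foldr_cons, List.map_cons, ih]
    unfold pvStepB pvG
    by_cases hx : PySem.Str.strip x = "part" <;> simp [hx]

-- ===== VERDICT (by name: the statement is the Claim_ definition above) =====
theorem split_parts_description_spec : Claim_equal_split_parts_description := by
  intro lines _ hpre
  obtain ⟨hne, hhead⟩ := hpre
  unfold Spec_split_parts_description split_parts_description split_parts_description_alt
  rw [pvOuterA_spec, List.foldl_reverse]
  show _ = (List.foldr (fun l p => pvStepB p l) ([], []) lines).1.reverse
  rw [pvAlt_foldr]
  simp only [List.reverse_reverse]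
  rw [pvFoldrG_fst]
  obtain ⟨l0, rest⟩ := lines
  · exact absurd rfl hne
  · simp only [List.headD_cons] at hhead
    simp [hhead]
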